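-- pv_equiv track=rewrite | github.com/papitaAlgodonCplusplus/Test_Trading_App | Market_Advisor/analyzers/simulator.py | has_consecutive_holds
-- ===== SOURCE A (Python) =====
-- def has_consecutive_holds(actions):
--     if not actions or actions[-1] == "Hold":
--         return False
--     consecutive_holds = 0
--     for action in reversed(actions[:-1]):
--         if action == "Hold":
--             consecutive_holds += 1
--         else:
--             break
--     return consecutive_holds > 10
-- ===== SOURCE B (Python) =====
-- def has_consecutive_holds(actions):
--     return (len(actions) >= 12
--             and actions[-1] != "Hold"
--             and all(a == "Hold" for a in actions[-12:-1]))
-- ===== Notes on version B (the rewrite author's own statement) =====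
-- stated objective: simpler
-- what changed: Replaces the reverse-scan loop that counts consecutive 'Hold's before the last action with a closed-form fixed-window test: length >= 12, last action not 'Hold', and the 11 elements actions[-12:-1] all 'Hold'.
import Mathlib
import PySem

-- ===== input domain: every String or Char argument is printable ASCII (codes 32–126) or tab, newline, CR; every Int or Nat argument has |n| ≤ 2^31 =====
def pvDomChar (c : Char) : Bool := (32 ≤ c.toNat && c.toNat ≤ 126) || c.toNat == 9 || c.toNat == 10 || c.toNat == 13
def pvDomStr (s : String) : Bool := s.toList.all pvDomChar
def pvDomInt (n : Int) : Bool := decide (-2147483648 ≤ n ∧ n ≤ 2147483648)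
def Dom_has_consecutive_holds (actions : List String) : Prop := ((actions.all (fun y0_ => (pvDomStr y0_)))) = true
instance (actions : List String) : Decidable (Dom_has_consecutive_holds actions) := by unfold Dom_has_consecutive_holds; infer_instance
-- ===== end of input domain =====

-- B replaces A's reverse-scan counting loop with a closed-form fixed-window test
-- (len ≥ 12, last ≠ "Hold", the 11 elements before the last all "Hold"): simpler, no counter loop.

-- ===== PORT A =====
-- the for/break loop of A: number of leading "Hold"s of the traversal order
def pvCountRun : List String → Nat
  | [] => 0
  | a :: rest => if a = "Hold" then pvCountRun rest + 1 else 0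

def has_consecutive_holds (actions : List String) : Bool :=
  if actions.isEmpty then false
  else if PySem.List.pyGet? actions (-1) = some "Hold" then false
  else decide (pvCountRun ((PySem.List.slice actions none (some (-1))).reverse) > 10)

-- ===== PORT B =====
def has_consecutive_holds_alt (actions : List String) : Bool :=
  decide (actions.length ≥ 12)
    && !(PySem.List.pyGet? actions (-1) = some "Hold")
    && (PySem.List.slice actions (some (-12)) (some (-1))).all (fun a => a = "Hold")

-- ===== PRECONDITION & SPEC =====
def Spec_has_consecutive_holds (actions : List String) (out : Bool) : Prop := out = has_consecutive_holds_alt actions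
instance (actions : List String) (out : Bool) : Decidable (Spec_has_consecutive_holds actions out) := by unfold Spec_has_consecutive_holds; infer_instance

-- ===== CLAIM (what is proved, stated in full; the proofs are below) =====
def Claim_equal_has_consecutive_holds : Prop := ∀ (actions : List String), Dom_has_consecutive_holds actions → Spec_has_consecutive_holds actions (has_consecutive_holds actions)

-- ===== LEMMAS AND PROOFS =====

lemma pvCountRun_ge (l : List String) (k : Nat) :
    k ≤ pvCountRun l ↔ k ≤ l.length ∧ ∀ x ∈ l.take k, x = "Hold" := by
  induction l generalizing k with
  | nil => simp [pvCountRun]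
  | cons a rest ih =>
    cases k with
    | zero => simp
    | succ k =>
      by_cases h : a = "Hold" <;>
        simp [pvCountRun, h, ih k, List.take_succ_cons]

lemma pvSlice_window (ys : List String) (z : String) (h : 11 ≤ ys.length) :
    PySem.List.slice (ys ++ [z]) (some (-12)) (some (-1)) = ys.drop (ys.length - 11) := by
  rw [PySem.List.slice]
  have h1 : ¬ ((ys.length : Int) + 1 + -12 < 0) := by omega
  have h2 : ¬ ((ys.length : Int) + 1 + -1 < 0) := by omega
  simp only [PySem.List.clampIdx, List.length_append, List.length_singleton,
    Nat.cast_add, Nat.cast_one]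
  norm_num [h1, h2]
  have h3 : ((ys.length : Int) + 1 + -12).toNat = ys.length - 11 := by omega
  rw [h3, if_neg (by omega : ¬ ((ys.length : Int) < 0)),
    List.drop_append_of_le_length (by omega),
    List.take_append_of_le_length (by simp),
    show ys.length - (ys.length - 11) = (ys.drop (ys.length - 11)).length by simp,
    List.take_length]

theorem has_consecutive_holds_spec : Claim_equal_has_consecutive_holds := by
  intro actions _
  unfold Spec_has_consecutive_holds has_consecutive_holds has_consecutive_holds_alt
  rcases actions.eq_nil_or_concat with rfl | ⟨ys, z, rfl⟩
  · simp [PySem.List.slice, PySem.List.pyGet?]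
  · rw [List.concat_eq_append, PySem.List.pyGet?_neg_one_append_singleton,
      PySem.List.slice_to_neg_one, List.dropLast_concat,
      if_neg (show ¬ ((ys ++ [z]).isEmpty = true) by simp)]
    by_cases hz : z = "Hold"
    · simp [hz]
    · rw [if_neg (show ¬ (some z = some "Hold") by simpa using hz)]
      rw [Bool.eq_iff_iff]
      simp only [Bool.and_eq_true, Bool.not_eq_eq_eq_not, Bool.not_true, decide_eq_true_eq,
        List.all_eq_true, Option.some.injEq, decide_eq_false_iff_not, List.length_append,
        List.length_singleton]
      by_cases hlen : 11 ≤ ys.length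
      · rw [pvSlice_window ys z hlen]
        constructor
        · intro hrun
          have := (pvCountRun_ge ys.reverse 11).mp (by omega)
          refine ⟨⟨by omega, hz⟩, ?_⟩
          intro x hx
          exact this.2 x (by rw [List.take_reverse]; simpa using hx)
        · rintro ⟨⟨hl, -⟩, hall⟩
          have : 11 ≤ pvCountRun ys.reverse := by
            rw [pvCountRun_ge]
            refine ⟨by simpa using hlen, ?_⟩
            intro x hx
            rw [List.take_reverse] at hx
            exact hall x (by simpa using hx)
          omega
      · constructor
        · intro hrun
          have := (pvCountRun_ge ys.reverse 11).mp (by omega)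
          exact absurd this.1 (by simp; omega)
        · rintro ⟨⟨hl, -⟩, -⟩
          omega
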